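-- pv_equiv track=rewrite | github.com/daniel-reich/ubiquitous-fiesta | ANdoCvhhaEibypkDE_11.py | closing_in_sum
-- ===== SOURCE A (Python) =====
-- def closing_in_sum(n):
--   str_number = str(n)
--   total = 0
--   while len(str_number) > 1:
--     total += int((str_number[0] + str_number[-1]))
--     str_number = str_number[1:-1]
--   try:
--     total += int(str_number[0])
--   except Exception as ex:
--     return total
--   return total
-- ===== SOURCE B (Python) =====
-- def closing_in_sum(n):
--     s = str(n)
--     h = len(s) // 2
--     total = sum(int(a + b) for a, b in zip(s[:h], s[::-1]))
--     if len(s) % 2 == 1: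
--         total += int(s[h])
--     return total
-- ===== Notes on version B (the rewrite author's own statement) =====
-- stated objective: alternative
-- what changed: A repeatedly slices the string (s = s[1:-1]) in a while-loop, copying the remaining string each iteration; B makes one pass, zipping s[:len(s)//2] with the reversed string and summing int(a+b), plus the lone middle digit for odd lengths.
import Mathlib
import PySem

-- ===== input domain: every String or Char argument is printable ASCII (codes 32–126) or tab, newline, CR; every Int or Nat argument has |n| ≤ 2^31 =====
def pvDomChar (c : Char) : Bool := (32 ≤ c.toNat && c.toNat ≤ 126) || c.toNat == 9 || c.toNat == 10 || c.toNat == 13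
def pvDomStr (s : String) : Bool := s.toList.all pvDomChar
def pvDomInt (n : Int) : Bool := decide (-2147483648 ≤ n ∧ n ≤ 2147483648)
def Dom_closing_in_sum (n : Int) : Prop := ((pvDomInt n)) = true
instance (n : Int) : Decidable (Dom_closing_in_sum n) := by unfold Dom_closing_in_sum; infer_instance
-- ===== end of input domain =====

-- B replaces A's slice-shrinking while-loop by a single zip of the string with its reverse
-- (objective: alternative — one pass over the digits instead of repeated slicing).

-- ===== PORT A =====
-- int(<one- or two-char substring of str(n)>); `.getD 0` is unreachable there (never ValueError)
def pvPairVal (a b : Char) : Int := (PySem.Int.ofChars? [a, b]).getD 0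
def pvDigitVal (c : Char) : Int := (PySem.Int.ofChars? [c]).getD 0

-- A's while-loop: total += int(s[0]+s[-1]); s = s[1:-1]; then try: total += int(s[0]) except: return total
def pvLoopA (l : List Char) (total : Int) : Int :=
  if 1 < l.length then
    match PySem.List.pyGet? l 0, PySem.List.pyGet? l (-1) with
    | some a, some b => pvLoopA (PySem.List.slice l (some 1) (some (-1))) (total + pvPairVal a b)
    | _, _ => total   -- unreachable: both indices are in range when 1 < len
  else
    match PySem.List.pyGet? l 0 with
    | none => total               -- IndexError → except → return total
    | some c => total + pvDigitVal c
termination_by l.length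
decreasing_by simp [pysem]; omega

def closing_in_sum (n : Int) : Int := pvLoopA (PySem.Int.toChars n) 0

-- ===== PORT B =====
def closing_in_sum_alt (n : Int) : Int :=
  let l := PySem.Int.toChars n                                -- s = str(n)
  let h := l.length / 2                                       -- h = len(s) // 2
  let total := ((PySem.List.slice l none (some (h : Int))).zip
      ((PySem.List.slice? l none none (-1)).getD [])).foldl   -- zip(s[:h], s[::-1]); step -1 never raises
      (fun t p => t + pvPairVal p.1 p.2) 0
  if l.length % 2 == 1 then total + pvDigitVal (PySem.List.pyGetD l (h : Int) ' ')  -- s[h]: in range when len odd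
  else total

-- ===== PRECONDITION & SPEC =====
def Spec_closing_in_sum (n : Int) (out : Int) : Prop := out = closing_in_sum_alt n
instance (n : Int) (out : Int) : Decidable (Spec_closing_in_sum n out) := by unfold Spec_closing_in_sum; infer_instance

-- ===== CLAIM (what is proved, stated in full; the proofs are below) =====
def Claim_equal_closing_in_sum : Prop := ∀ (n : Int), Dom_closing_in_sum n → Spec_closing_in_sum n (closing_in_sum n)

-- ===== LEMMAS AND PROOFS =====

-- B's computation as a function of the character list (closing_in_sum_alt n = pvB (toChars n) by rfl)
def pvB (l : List Char) : Int :=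
  let h := l.length / 2
  let total := ((PySem.List.slice l none (some (h : Int))).zip
      ((PySem.List.slice? l none none (-1)).getD [])).foldl
      (fun t p => t + pvPairVal p.1 p.2) 0
  if l.length % 2 == 1 then total + pvDigitVal (PySem.List.pyGetD l (h : Int) ' ')
  else total

theorem pv_zip_append_right {α β : Type} (l1 : List α) (l2 l3 : List β)
    (h : l1.length ≤ l2.length) : l1.zip (l2 ++ l3) = l1.zip l2 := by
  induction l1 generalizing l2 with
  | nil => simp
  | cons a t ih =>
    cases l2 with
    | nil => simp at h
    | cons b t2 => simp_all [List.zip_cons_cons]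

theorem pvB_nil : pvB [] = 0 := by
  simp [pvB, PySem.List.slice?_none_none_neg_one]

theorem pvB_singleton (c : Char) : pvB [c] = pvDigitVal c := by
  simp [pvB, PySem.List.slice?_none_none_neg_one, PySem.List.slice]

theorem pvB_concat (c d : Char) (mid : List Char) :
    pvB (c :: mid ++ [d]) = pvPairVal c d + pvB mid := by
  simp only [pvB]
  have hlen : (c :: mid ++ [d]).length = mid.length + 2 := by simp
  rw [hlen]
  have hdiv : (mid.length + 2) / 2 = mid.length / 2 + 1 := by omega
  rw [hdiv]
  rw [PySem.List.slice_to_natCast, PySem.List.slice_to_natCast]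
  rw [PySem.List.slice?_none_none_neg_one, PySem.List.slice?_none_none_neg_one]
  simp only [Option.getD_some]
  have htake : (c :: mid ++ [d]).take (mid.length / 2 + 1)
      = c :: mid.take (mid.length / 2) := by
    simp [List.take_append_of_le_length (by omega : mid.length / 2 ≤ mid.length)]
  have hrev : (c :: mid ++ [d]).reverse = d :: (mid.reverse ++ [c]) := by simp
  rw [htake, hrev, List.zip_cons_cons]
  rw [pv_zip_append_right _ _ _ (by simp [List.length_take])]
  rw [List.foldl_cons, PySem.List.foldl_add, PySem.List.foldl_add]
  have hmod : (mid.length + 2) % 2 = mid.length % 2 := by omega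
  rw [hmod]
  rcases Nat.mod_two_eq_zero_or_one mid.length with hm | hm
  · simp [hm]
  · simp only [hm, beq_self_eq_true, if_true]
    have hget : PySem.List.pyGetD (c :: mid ++ [d]) ((mid.length / 2 + 1 : Nat) : Int) ' '
        = PySem.List.pyGetD mid ((mid.length / 2 : Nat) : Int) ' ' := by
      simp only [PySem.List.pyGetD_natCast]
      have hlt : mid.length / 2 < mid.length := by omega
      simp [List.getD, List.getElem?_append_left hlt]
    push_cast at hget ⊢
    rw [hget]; ring

theorem loopA_eq (l : List Char) (total : Int) : pvLoopA l total = total + pvB l := by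
  rcases l with _ | ⟨c, rest⟩
  · rw [pvLoopA.eq_def]
    simp [pvB_nil, PySem.List.pyGet?_zero]
  · rcases List.eq_nil_or_concat rest with rfl | ⟨mid, d, rfl⟩
    · rw [pvLoopA.eq_def]
      simp [pvB_singleton]
    · simp only [List.concat_eq_append]
      have h1 : 1 < (c :: (mid ++ [d])).length := by simp
      have hslice : PySem.List.slice (c :: (mid ++ [d])) (some 1) (some (-1)) = mid := by
        simp [PySem.List.slice, pysem]
      have hget0 : PySem.List.pyGet? (c :: (mid ++ [d])) 0 = some c :=
        PySem.List.pyGet?_zero_cons c (mid ++ [d])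
      have hgetm1 : PySem.List.pyGet? (c :: (mid ++ [d])) (-1) = some d :=
        PySem.List.pyGet?_neg_one_append_singleton (c :: mid) d
      have hpvb := pvB_concat c d mid
      rw [List.cons_append] at hpvb
      rw [pvLoopA.eq_def, if_pos h1, hget0, hgetm1, hslice]
      show pvLoopA mid (total + pvPairVal c d) = total + pvB (c :: (mid ++ [d]))
      rw [loopA_eq mid (total + pvPairVal c d), hpvb]
      ring
termination_by l.length
decreasing_by
  rename_i hx1 hx2 hrest
  subst hrest
  simp only [List.concat_eq_append, List.length_cons, List.length_append, List.length_nil]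
  omega

-- ===== VERDICT (by name: the statement is the Claim_ definition above) =====
theorem closing_in_sum_spec : Claim_equal_closing_in_sum := by
  intro n _
  show closing_in_sum n = closing_in_sum_alt n
  rw [closing_in_sum, loopA_eq, zero_add]
  rfl
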